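-- pv_equiv track=rewrite | github.com/HellOwhatAs/SimWeight-experiment | extract_data.py | groupy_uv
-- ===== SOURCE A (Python) =====
-- from typing import List, Tuple, Dict, Literal
--
-- def groupy_uv(trips: List[List[int]], edges: List[Tuple[int, int]]) -> Dict[Tuple[int, int], List[List[int]]]:
--     uv2trips: Dict[Tuple[int, int], List[List[int]]] = {}
--     for trip in trips:
--         key = (edges[trip[0]][0], edges[trip[-1]][1])
--         if key[0] == key[1]: continue
--         if key in uv2trips: uv2trips[key].append(trip)
--         else: uv2trips[key] = [trip]
--     return uv2trips
-- ===== SOURCE B (Python) =====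
-- def groupy_uv(trips, edges):
--     # two-pass: compute each trip's (u, v) key once, collect distinct non-loop
--     # keys in first-occurrence order, then gather each key's trips by a scan
--     keys = [(edges[t[0]][0], edges[t[-1]][1]) for t in trips]
--     seen = []
--     for k in keys:
--         if k[0] != k[1] and k not in seen:
--             seen.append(k)
--     return {k: [t for t, kk in zip(trips, keys) if kk == k] for k in seen}
-- ===== Notes on version B (the rewrite author's own statement) =====
-- stated objective: alternative
-- what changed: replaces the single-pass dict-accumulator with a two-pass scheme: precompute all keys, dedupe the non-loop keys in first-occurrence order, then build each group by filtering the (trip,key) pairs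
import Mathlib
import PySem

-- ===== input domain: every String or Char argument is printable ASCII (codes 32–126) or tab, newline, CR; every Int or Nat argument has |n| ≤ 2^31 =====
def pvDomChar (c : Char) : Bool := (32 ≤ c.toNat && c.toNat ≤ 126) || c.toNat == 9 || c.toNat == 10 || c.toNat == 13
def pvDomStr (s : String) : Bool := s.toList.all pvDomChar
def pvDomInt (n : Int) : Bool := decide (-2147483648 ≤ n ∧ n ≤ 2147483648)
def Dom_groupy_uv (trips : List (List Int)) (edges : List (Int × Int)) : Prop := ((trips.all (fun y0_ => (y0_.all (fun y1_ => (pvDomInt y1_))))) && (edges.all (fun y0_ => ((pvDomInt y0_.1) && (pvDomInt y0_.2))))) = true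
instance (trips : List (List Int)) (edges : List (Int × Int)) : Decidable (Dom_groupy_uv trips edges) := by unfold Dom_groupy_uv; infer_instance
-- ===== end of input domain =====

-- B replaces A's single-pass dict accumulator by a two-pass scheme (precompute keys,
-- ordered dedup of non-loop keys, then gather each group by filtering); alternative, not faster.


-- ===== PORT A =====
-- key = (edges[trip[0]][0], edges[trip[-1]][1]); none exactly where Python raises IndexError
def pvKey? (edges : List (Int × Int)) (trip : List Int) : Option (Int × Int) :=
  match PySem.List.pyGet? trip 0, PySem.List.pyGet? trip (-1) with
  | some i, some j =>
    match PySem.List.pyGet? edges i, PySem.List.pyGet? edges j with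
    | some e, some f => some (e.1, f.2)
    | _, _ => none
  | _, _ => none

def pvStepA (edges : List (Int × Int)) (d : PySem.Dict (Int × Int) (List (List Int)))
    (trip : List Int) : PySem.Dict (Int × Int) (List (List Int)) :=
  match pvKey? edges trip with
  | none => d
  | some key =>
    if key.1 == key.2 then d
    else
      match d.get? key with
      | some l => d.insert key (l ++ [trip])   -- uv2trips[key].append(trip): overwrite keeps position
      | none => d.insert key [trip]

def groupy_uv (trips : List (List Int)) (edges : List (Int × Int)) : List (Int × Int × List (List Int)) :=
  ((trips.foldl (pvStepA edges) PySem.Dict.empty).items).map (fun p => (p.1.1, p.1.2, p.2))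

-- ===== PORT B =====
-- seen: distinct non-loop keys in first-occurrence order ('k not in seen' appends)
def pvSeen (keys : List (Option (Int × Int))) : List (Int × Int) :=
  keys.foldl (fun s k? =>
    match k? with
    | some k => if k.1 ≠ k.2 ∧ k ∉ s then s ++ [k] else s
    | none => s) []

def groupy_uv_alt (trips : List (List Int)) (edges : List (Int × Int)) : List (Int × Int × List (List Int)) :=
  (pvSeen (trips.map (pvKey? edges))).map (fun k =>
    (k.1, k.2, ((trips.zip (trips.map (pvKey? edges))).filter (fun p => p.2 == some k)).map (·.1)))

-- ===== PRECONDITION & SPEC =====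
-- Pre_ excludes exactly the inputs where A raises IndexError: an empty trip, or a
-- trip whose first/last entry is out of range as a Python index into edges.
def Pre_groupy_uv (trips : List (List Int)) (edges : List (Int × Int)) : Prop :=
  ∀ t ∈ trips, t ≠ [] ∧ PySem.Raise.InRange edges.length (t.headD 0) ∧
    PySem.Raise.InRange edges.length (t.getLastD 0)
instance (trips : List (List Int)) (edges : List (Int × Int)) : Decidable (Pre_groupy_uv trips edges) := by unfold Pre_groupy_uv; infer_instance
def pvWitness_groupy_uv : List (List Int) × (List (Int × Int)) := ([[0], [0, -1]], [(1, 2), (2, 1)])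

def Spec_groupy_uv (trips : List (List Int)) (edges : List (Int × Int)) (out : List (Int × Int × List (List Int))) : Prop := out = groupy_uv_alt trips edges
instance (trips : List (List Int)) (edges : List (Int × Int)) (out : List (Int × Int × List (List Int))) : Decidable (Spec_groupy_uv trips edges out) := by unfold Spec_groupy_uv; infer_instance

-- ===== CLAIM (what is proved, stated in full; the proofs are below) =====
def Claim_equal_groupy_uv : Prop := ∀ (trips : List (List Int)) (edges : List (Int × Int)), Dom_groupy_uv trips edges → Pre_groupy_uv trips edges → Spec_groupy_uv trips edges (groupy_uv trips edges)

-- ===== LEMMAS AND PROOFS =====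

-- the (trip, key) pairs both sides really traverse
def pvPairs (trips : List (List Int)) (edges : List (Int × Int)) : List (List Int × Option (Int × Int)) :=
  trips.map (fun t => (t, pvKey? edges t))

-- B's seen fold, generalized to any start
def pvSeenFrom (s : List (Int × Int)) (keys : List (Option (Int × Int))) : List (Int × Int) :=
  keys.foldl (fun s k? =>
    match k? with
    | some k => if k.1 ≠ k.2 ∧ k ∉ s then s ++ [k] else s
    | none => s) s

lemma seenFrom_cons_some (s : List (Int × Int)) (k : Int × Int) (ks : List (Option (Int × Int))) :
    pvSeenFrom s (some k :: ks) = pvSeenFrom (if k.1 ≠ k.2 ∧ k ∉ s then s ++ [k] else s) ks := rfl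

lemma seenFrom_cons_none (s : List (Int × Int)) (ks : List (Option (Int × Int))) :
    pvSeenFrom s (none :: ks) = pvSeenFrom s ks := rfl

lemma keys_foldl_stepA (edges : List (Int × Int)) :
    ∀ (trips : List (List Int)) (d : PySem.Dict (Int × Int) (List (List Int))),
    (trips.foldl (pvStepA edges) d).keys = pvSeenFrom d.keys (trips.map (pvKey? edges)) := by
  intro trips
  induction trips with
  | nil => intro d; rfl
  | cons t ts ih =>
    intro d
    simp only [List.foldl_cons, List.map_cons]
    rw [ih]
    cases hk : pvKey? edges t with
    | none =>
      have hstep : pvStepA edges d t = d := by unfold pvStepA; rw [hk]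
      rw [hstep, seenFrom_cons_none]
    | some k =>
      rw [seenFrom_cons_some]
      by_cases hloop : (k.1 == k.2) = true
      · have heq : k.1 = k.2 := by simpa using hloop
        have hstep : pvStepA edges d t = d := by unfold pvStepA; rw [hk]; simp [hloop]
        rw [hstep, if_neg (by simp [heq])]
      · have hf : (k.1 == k.2) = false := by simpa using hloop
        have hne : k.1 ≠ k.2 := by simpa using hloop
        cases hg : d.get? k with
        | some l =>
          have hc : d.contains k = true := by rw [PySem.Dict.contains_eq_isSome_get?, hg]; rfl
          have hstep : pvStepA edges d t = d.insert k (l ++ [t]) := by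
            unfold pvStepA; rw [hk]; simp [hf, hg]
          rw [hstep, PySem.Dict.keys_insert_of_contains _ _ hc,
              if_neg (by simp [(PySem.Dict.contains_iff_mem_keys d k).1 hc])]
        | none =>
          have hc : d.contains k = false := by rw [PySem.Dict.contains_eq_isSome_get?, hg]; rfl
          have hstep : pvStepA edges d t = d.insert k [t] := by
            unfold pvStepA; rw [hk]; simp [hf, hg]
          have hmem : k ∉ d.keys := fun h => by
            simp [(PySem.Dict.contains_iff_mem_keys d k).2 h] at hc
          rw [hstep, PySem.Dict.keys_insert_of_not_contains _ _ hc, if_pos ⟨hne, hmem⟩]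

lemma stepA_insert (edges : List (Int × Int)) (d : PySem.Dict (Int × Int) (List (List Int)))
    (t : List Int) (k' : Int × Int) (hkt : pvKey? edges t = some k')
    (hf : (k'.1 == k'.2) = false) :
    pvStepA edges d t = d.insert k' (d.getD k' [] ++ [t]) := by
  unfold pvStepA
  rw [hkt]
  simp only [hf, Bool.false_eq_true, if_false]
  cases hg : d.get? k' with
  | some l => rw [PySem.Dict.getD_of_get?_eq_some _ _ hg]
  | none => rw [PySem.Dict.getD_of_get?_eq_none _ _ hg]; rfl

lemma getD_foldl_stepA (edges : List (Int × Int)) (k : Int × Int) (hk : k.1 ≠ k.2) :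
    ∀ (trips : List (List Int)) (d : PySem.Dict (Int × Int) (List (List Int))),
    (trips.foldl (pvStepA edges) d).getD k [] =
      d.getD k [] ++ ((pvPairs trips edges).filter (fun p => p.2 == some k)).map (·.1) := by
  intro trips
  induction trips with
  | nil => intro d; simp [pvPairs]
  | cons t ts ih =>
    intro d
    simp only [List.foldl_cons, pvPairs, List.map_cons, List.filter_cons]
    cases hkt : pvKey? edges t with
    | none =>
      have hstep : pvStepA edges d t = d := by unfold pvStepA; rw [hkt]
      rw [hstep, ih]
      simp [pvPairs]
    | some k' =>
      by_cases hloop : (k'.1 == k'.2) = true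
      · have hstep : pvStepA edges d t = d := by unfold pvStepA; rw [hkt]; simp [hloop]
        have hne : k' ≠ k := by intro h; subst h; exact hk (by simpa using hloop)
        rw [hstep, ih]
        simp [pvPairs, hne]
      · have hf : (k'.1 == k'.2) = false := by simpa using hloop
        rw [stepA_insert edges d t k' hkt hf, ih]
        by_cases hkk : k' = k
        · subst hkk
          rw [PySem.Dict.getD_insert_self]
          simp [pvPairs]
        · rw [PySem.Dict.getD_insert_of_ne _ _ _ (fun h => hkk h.symm)]
          simp [pvPairs, hkk]

lemma nodup_seenFrom : ∀ (keys : List (Option (Int × Int))) (s : List (Int × Int)),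
    s.Nodup → (pvSeenFrom s keys).Nodup := by
  intro keys
  induction keys with
  | nil => intro s h; exact h
  | cons k? ks ih =>
    intro s h
    cases k? with
    | none => rw [seenFrom_cons_none]; exact ih s h
    | some k =>
      rw [seenFrom_cons_some]
      by_cases hc : k.1 ≠ k.2 ∧ k ∉ s
      · rw [if_pos hc]
        refine ih _ ?_
        rw [List.nodup_append]
        exact ⟨h, List.nodup_singleton _, fun a ha b hb => by simp only [List.mem_singleton] at hb; exact fun he => hc.2 ((he.trans hb) ▸ ha)⟩
      · rw [if_neg hc]; exact ih s h

lemma mem_seenFrom : ∀ (keys : List (Option (Int × Int))) (s : List (Int × Int)) (k : Int × Int),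
    k ∈ pvSeenFrom s keys → k ∈ s ∨ k.1 ≠ k.2 := by
  intro keys
  induction keys with
  | nil => intro s k h; exact Or.inl h
  | cons k? ks ih =>
    intro s k h
    cases k? with
    | none => rw [seenFrom_cons_none] at h; exact ih s k h
    | some k' =>
      rw [seenFrom_cons_some] at h
      by_cases hc : k'.1 ≠ k'.2 ∧ k' ∉ s
      · rw [if_pos hc] at h
        rcases ih _ k h with hm | hne
        · rcases List.mem_append.1 hm with hm | hm
          · exact Or.inl hm
          · simp only [List.mem_singleton] at hm; subst hm; exact Or.inr hc.1
        · exact Or.inr hne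
      · rw [if_neg hc] at h; exact ih s k h

lemma items_eq_keys_map (d : PySem.Dict (Int × Int) (List (List Int))) (h : d.keys.Nodup) :
    d.items = d.keys.map (fun k => (k, d.getD k [])) := by
  have hkeys : d.keys = d.items.map (·.1) := rfl
  rw [hkeys, List.map_map]
  have : ∀ p ∈ d.items, ((fun k => (k, d.getD k [])) ∘ (·.1)) p = id p := by
    intro p hp
    have := PySem.Dict.getD_of_mem_items (d := d) (k := p.1) (v := p.2) (by simpa using hp) h []
    simp [this]
  rw [List.map_congr_left this, List.map_id]

-- ===== VERDICT (by name: the statement is the Claim_ definition above) =====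
theorem groupy_uv_spec : Claim_equal_groupy_uv := by
  intro trips edges _ _
  unfold Spec_groupy_uv groupy_uv groupy_uv_alt
  have hz : trips.zip (trips.map (pvKey? edges)) = pvPairs trips edges :=
    (List.map_prod_left_eq_zip (l := trips) (f := pvKey? edges)).symm
  have hseen : pvSeen (trips.map (pvKey? edges)) = pvSeenFrom [] (trips.map (pvKey? edges)) := rfl
  set D := trips.foldl (pvStepA edges) PySem.Dict.empty with hD
  have hkeys : D.keys = pvSeenFrom [] (trips.map (pvKey? edges)) := by
    rw [hD, keys_foldl_stepA]
    simp [PySem.Dict.keys_empty]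
  have hnodup : D.keys.Nodup := by rw [hkeys]; exact nodup_seenFrom _ _ List.nodup_nil
  rw [items_eq_keys_map D hnodup, List.map_map, hkeys, hz, hseen]
  apply List.map_congr_left
  intro k hk
  have hne : k.1 ≠ k.2 := by
    rcases mem_seenFrom _ _ _ hk with h | h
    · simp at h
    · exact h
  have hg : D.getD k [] = ((pvPairs trips edges).filter (fun p => p.2 == some k)).map (·.1) := by
    rw [hD, getD_foldl_stepA edges k hne]
    simp [PySem.Dict.getD_empty]
  simp [Function.comp, hg]
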